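-- pv_equiv track=rewrite | github.com/diofeher/algorithms | order-buckets.py | sliding_window_sum
-- ===== SOURCE A (Python) =====
-- def sliding_window_sum(inp):
--     lst = list(inp)
--
--     N = len(lst)
--     B = lst.count("B")
--
--     # 2 - Return invalid if there is no available space to order the buckets -> O(1)
--     if B * 2 - 1 > N:
--         return -1
--
--     best_value = B
--     for i in range(N):
--         cur_value = B
--         for j in range(B):
--             cur_pos = i + j * 2
--             if cur_pos > N - 1:
--                 break
--             if lst[cur_pos] == "B":
--                 cur_value -= 1
--         best_value = min(best_value, cur_value)
--
--     return best_value
-- ===== SOURCE B (Python) =====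
-- def sliding_window_sum(inp):
--     s = list(inp)
--     N = len(s)
--     B = s.count("B")
--     if B * 2 - 1 > N:
--         return -1
--     if B == 0:
--         return 0
--     # c[i] = number of "B" among positions i, i+2, ..., i+2*(B-1) that are < N,
--     # computed right-to-left in O(1) each: add position i, drop position i+2*B.
--     c = [0] * (N + 2)
--     for i in range(N - 1, -1, -1):
--         c[i] = (s[i] == "B") + c[i + 2]
--         t = i + 2 * B
--         if t < N and s[t] == "B":
--             c[i] -= 1
--     best = 0
--     for i in range(N):
--         best = max(best, c[i])
--     return B - best
-- ===== Notes on version B (the rewrite author's own statement) =====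
-- stated objective: faster
-- what changed: Replaces the O(B) inner rescan of the stride-2 window at every start position with a right-to-left O(1) sliding update (add s[i], drop s[i+2B]) building all window counts in one pass, then returns B minus their maximum.
import Mathlib
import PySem

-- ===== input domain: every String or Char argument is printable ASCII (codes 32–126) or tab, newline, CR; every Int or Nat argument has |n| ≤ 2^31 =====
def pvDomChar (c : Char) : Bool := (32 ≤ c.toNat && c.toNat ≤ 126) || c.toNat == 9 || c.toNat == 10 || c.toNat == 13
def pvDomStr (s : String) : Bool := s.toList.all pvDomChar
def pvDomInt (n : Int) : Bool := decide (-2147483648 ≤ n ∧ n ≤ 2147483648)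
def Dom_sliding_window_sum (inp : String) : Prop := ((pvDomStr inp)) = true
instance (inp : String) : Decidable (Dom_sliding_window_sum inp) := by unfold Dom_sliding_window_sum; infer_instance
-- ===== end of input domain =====

-- B replaces A's O(B) inner rescan per start position with a one-pass right-to-left
-- O(1) sliding update of the stride-2 window counts (objective: faster, O(N*B) -> O(N)).


-- ===== PORT A =====
-- inner 'for j in range(B): … break …' loop; the index is always in range when read
-- (the guard ensures 0 ≤ i + j*2 ≤ N-1), so pyGet? is exact here.
def pvInnerA (cs : List Char) (N i : Int) : List Int → Int → Int
  | [], cur => cur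
  | j :: js, cur =>
    if i + j * 2 > N - 1 then cur
    else pvInnerA cs N i js
      (if PySem.List.pyGet? cs (i + j * 2) = some 'B' then cur - 1 else cur)

def sliding_window_sum (inp : String) : Int :=
  let lst := inp.toList
  let N : Int := lst.length
  let B : Int := PySem.List.count lst 'B'
  if B * 2 - 1 > N then -1
  else
    (PySem.List.pyRange 0 N 1).foldl
      (fun best i => min best (pvInnerA lst N i (PySem.List.pyRange 0 B 1) B)) B

-- ===== PORT B =====
-- Source B's downward loop 'for i in range(N-1, -1, -1): c[i] = (s[i]=="B") + c[i+2] …';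
-- each iteration reads only entries to its right, so it is transcribed as building
-- the suffix list [c_{N-m}, …, c_{N+1}] (m = iterations done); all reads in range.
def pvBuildC (cs : List Char) (N B : Nat) : Nat → List Int
  | 0 => [0, 0]
  | m + 1 =>
    let rest := pvBuildC cs N B m
    let i := N - (m + 1)
    let v : Int := (if cs.getD i ' ' = 'B' then 1 else 0) + rest.getD 1 0
    let v := if i + 2 * B < N ∧ cs.getD (i + 2 * B) ' ' = 'B' then v - 1 else v
    v :: rest

def sliding_window_sum_alt (inp : String) : Int :=
  let s := inp.toList
  let N := s.length
  let B := PySem.List.count s 'B'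
  if (B : Int) * 2 - 1 > (N : Int) then -1
  else if B = 0 then 0
  else
    let c := pvBuildC s N B N
    let best := (List.range N).foldl (fun best i => max best (c.getD i 0)) 0
    (B : Int) - best

-- ===== PRECONDITION & SPEC =====
def Spec_sliding_window_sum (inp : String) (out : Int) : Prop := out = sliding_window_sum_alt inp
instance (inp : String) (out : Int) : Decidable (Spec_sliding_window_sum inp out) := by unfold Spec_sliding_window_sum; infer_instance

-- ===== CLAIM (what is proved, stated in full; the proofs are below) =====
def Claim_equal_sliding_window_sum : Prop := ∀ (inp : String), Dom_sliding_window_sum inp → Spec_sliding_window_sum inp (sliding_window_sum inp)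

-- ===== LEMMAS AND PROOFS =====

-- number of 'B' among positions i, i+2, …, i+2*(B-1) that are < cs.length
def pvCnt (cs : List Char) (B i : Nat) : Int :=
  ∑ k ∈ Finset.range B,
    if i + 2 * k < cs.length ∧ cs.getD (i + 2 * k) ' ' = 'B' then 1 else 0

lemma pvCnt_of_ge (cs : List Char) (B i : Nat) (h : cs.length ≤ i) : pvCnt cs B i = 0 := by
  unfold pvCnt
  refine Finset.sum_eq_zero fun k _ => ?_
  rw [if_neg]; omega

lemma pvCnt_rec (cs : List Char) (B i : Nat) (hB : 1 ≤ B) (hi : i < cs.length) :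
    pvCnt cs B i =
      (if cs.getD i ' ' = 'B' then 1 else 0) + pvCnt cs B (i + 2)
        - (if i + 2 * B < cs.length ∧ cs.getD (i + 2 * B) ' ' = 'B' then 1 else 0) := by
  obtain ⟨b, rfl⟩ : ∃ b, B = b + 1 := ⟨B - 1, by omega⟩
  unfold pvCnt
  rw [Finset.sum_range_succ' (fun k => if i + 2 * k < cs.length ∧ cs.getD (i + 2 * k) ' ' = 'B' then (1:Int) else 0) b,
      Finset.sum_range_succ]
  have h0 : (if i + 2 * 0 < cs.length ∧ cs.getD (i + 2 * 0) ' ' = 'B' then (1:Int) else 0)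
      = (if cs.getD i ' ' = 'B' then (1:Int) else 0) := by
    simp only [Nat.mul_zero, Nat.add_zero]
    rw [if_congr (and_iff_right hi) rfl rfl]
  have h1 : ∀ k, i + 2 + 2 * k = i + 2 * (k + 1) := by omega
  simp only [h1, h0]
  ring

lemma pvInnerA_spec (cs : List Char) (i : Nat) :
    ∀ (b j : Nat) (cur : Int),
      pvInnerA cs (cs.length : Int) (i : Int)
          (PySem.List.pyRange (j : Int) ((j : Int) + (b : Int)) 1) cur
        = cur - ∑ k ∈ Finset.range b,
            (if i + 2 * (j + k) < cs.length ∧ cs.getD (i + 2 * (j + k)) ' ' = 'B'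
             then (1:Int) else 0) := by
  intro b
  induction b with
  | zero => intro j cur; rw [PySem.List.pyRange_one_eq_nil (by omega)]; simp [pvInnerA]
  | succ b ih =>
    intro j cur
    rw [PySem.List.pyRange_one_cons (by push_cast; omega)]
    show pvInnerA cs (cs.length : Int) (i : Int) _ cur = _
    unfold pvInnerA
    by_cases hpos : (i : Int) + (j : Int) * 2 > (cs.length : Int) - 1
    · rw [if_pos hpos]
      have hz : ∑ k ∈ Finset.range (b + 1),
          (if i + 2 * (j + k) < cs.length ∧ cs.getD (i + 2 * (j + k)) ' ' = 'B'
           then (1:Int) else 0) = 0 := by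
        refine Finset.sum_eq_zero fun k _ => ?_
        rw [if_neg]; omega
      rw [hz]; ring
    · rw [if_neg hpos]
      have hlt : i + 2 * j < cs.length := by omega
      have hget : PySem.List.pyGet? cs ((i : Int) + (j : Int) * 2)
          = some (cs[i + 2 * j]'hlt) := by
        have := PySem.List.pyGet?_eq_some_getElem cs
          (i := (i : Int) + (j : Int) * 2) (by omega) (by omega)
        rw [this]
        congr 1
        · congr 1; omega
      have hgetD : cs.getD (i + 2 * j) ' ' = cs[i + 2 * j]'hlt :=
        List.getD_eq_getElem cs ' ' hlt
      have hcastA : ((j : Int) + 1) = ((j + 1 : Nat) : Int) := by push_cast; ring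
      have hcastB : ((j : Int) + ((b + 1 : Nat) : Int)) = ((j + 1 : Nat) : Int) + (b : Nat) := by
        push_cast; ring
      rw [hget, hcastA, hcastB, ih (j + 1)]
      rw [Finset.sum_range_succ' (fun k =>
        if i + 2 * (j + k) < cs.length ∧ cs.getD (i + 2 * (j + k)) ' ' = 'B'
        then (1:Int) else 0) b]
      have h1 : ∀ k, j + 1 + k = j + (k + 1) := by omega
      have h0 : (if i + 2 * (j + 0) < cs.length ∧ cs.getD (i + 2 * (j + 0)) ' ' = 'B'
          then (1:Int) else 0) = (if cs[i + 2 * j]'hlt = 'B' then (1:Int) else 0) := by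
        simp only [Nat.add_zero]
        rw [if_congr ((and_iff_right hlt).trans
          (iff_of_eq (congrArg (· = 'B') hgetD))) rfl rfl]
      simp only [h1, h0, Option.some.injEq]
      split_ifs <;> ring

-- pvInnerA over the full range(B) computes cur - pvCnt
lemma pvInnerA_cnt (cs : List Char) (i B : Nat) (cur : Int) :
    pvInnerA cs (cs.length : Int) (i : Int) (PySem.List.pyRange 0 (B : Int) 1) cur
      = cur - pvCnt cs B i := by
  have h := pvInnerA_spec cs i B 0 cur
  simp only [Nat.cast_zero, zero_add] at h
  rw [h]
  unfold pvCnt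
  norm_num

-- entry 1 of the suffix list [pvCnt (N-m), …, pvCnt (N-1), 0, 0] is pvCnt (N-(m+1)+2)
lemma pvGetD1 (cs : List Char) (B m : Nat) (hm : m + 1 ≤ cs.length) :
    ((List.range' (cs.length - m) m).map (pvCnt cs B) ++ [0, 0]).getD 1 0
      = pvCnt cs B (cs.length - (m + 1) + 2) := by
  by_cases h2 : 2 ≤ m
  · rw [List.getD_eq_getElem?_getD,
        List.getElem?_append_left (by rw [List.length_map, List.length_range']; omega),
        List.getElem?_map, List.getElem?_range' (by omega)]
    simp only [Option.map_some, Option.getD_some]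
    congr 1
    omega
  · interval_cases m
    · rw [pvCnt_of_ge cs B (cs.length - (0 + 1) + 2) (by omega)]
      rfl
    · rw [pvCnt_of_ge cs B (cs.length - (1 + 1) + 2) (by omega)]
      simp [List.range'_one]

-- the suffix list built by pvBuildC is [pvCnt (N-m), …, pvCnt (N-1), 0, 0]
lemma pvBuildC_spec (cs : List Char) (B : Nat) (hB : 1 ≤ B) :
    ∀ m, m ≤ cs.length →
      pvBuildC cs cs.length B m
        = (List.range' (cs.length - m) m).map (pvCnt cs B) ++ [0, 0] := by
  intro m
  induction m with
  | zero => intro _; simp [pvBuildC]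
  | succ m ih =>
    intro hm
    have hrest := ih (by omega)
    simp only [pvBuildC]
    rw [hrest, pvGetD1 cs B m hm]
    rw [show List.range' (cs.length - (m + 1)) (m + 1)
        = (cs.length - (m + 1)) :: List.range' (cs.length - m) m from by
      rw [List.range'_succ, show cs.length - (m + 1) + 1 = cs.length - m from by omega]]
    simp only [List.map_cons, List.cons_append]
    congr 1
    have hv := pvCnt_rec cs B (cs.length - (m + 1)) hB (by omega)
    by_cases h : cs.length - (m + 1) + 2 * B < cs.length
        ∧ cs.getD (cs.length - (m + 1) + 2 * B) ' ' = 'B'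
    · rw [if_pos h]; rw [if_pos h] at hv; omega
    · rw [if_neg h]; rw [if_neg h] at hv; omega

lemma pv_min_max_fold (B : Int) (g : Nat → Int) :
    ∀ (l : List Nat) (acc : Int),
      l.foldl (fun best i => min best (B - g i)) (B - acc)
        = B - l.foldl (fun best i => max best (g i)) acc := by
  intro l
  induction l with
  | nil => intro acc; simp
  | cons x xs ih =>
    intro acc
    simp only [List.foldl_cons]
    rw [show min (B - acc) (B - g x) = B - max acc (g x) by omega]
    exact ih (max acc (g x))

-- entry i < N of the full list [pvCnt 0, …, pvCnt (N-1), 0, 0]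
lemma pvGetD_cnt (cs : List Char) (B i : Nat) (hi : i < cs.length) :
    ((List.range' 0 cs.length).map (pvCnt cs B) ++ [0, 0]).getD i 0 = pvCnt cs B i := by
  rw [List.getD_eq_getElem?_getD,
      List.getElem?_append_left (by simpa using hi),
      List.getElem?_map, List.getElem?_range' hi]
  simp

-- ===== VERDICT (by name: the statement is the Claim_ definition above) =====
theorem sliding_window_sum_spec : Claim_equal_sliding_window_sum := by
  intro inp _
  show sliding_window_sum inp = sliding_window_sum_alt inp
  simp only [sliding_window_sum, sliding_window_sum_alt]
  generalize inp.toList = cs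
  have hA : ∀ B : Nat, List.foldl
      (fun best i => min best (pvInnerA cs (cs.length : Int) i
        (PySem.List.pyRange 0 (B : Int) 1) (B : Int))) (B : Int)
      (PySem.List.pyRange 0 (cs.length : Int) 1)
      = (B : Int) - (List.range cs.length).foldl (fun best i => max best (pvCnt cs B i)) 0 := by
    intro B
    rw [PySem.List.pyRange_zero_natCast cs.length, List.foldl_map]
    have hfun : (fun (best : Int) (k : Nat) =>
        min best (pvInnerA cs (cs.length : Int) (k : Int)
          (PySem.List.pyRange 0 (B : Int) 1) (B : Int)))
        = fun best k => min best ((B : Int) - pvCnt cs B k) := by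
      funext best k
      rw [pvInnerA_cnt cs k B (B : Int)]
    rw [hfun]
    simpa using pv_min_max_fold (B : Int) (pvCnt cs B) (List.range cs.length) 0
  split_ifs with hguard hB0
  · rfl
  · rw [hA, hB0]
    have hfun0 : (fun (best : Int) (i : Nat) => max best (pvCnt cs 0 i))
        = fun best _ => max best 0 := by
      funext best i
      rw [show pvCnt cs 0 i = 0 from by simp [pvCnt]]
    rw [hfun0]
    have hfold0 : ∀ l : List Nat,
        List.foldl (fun (best : Int) (_ : Nat) => max best 0) 0 l = 0 := by
      intro l
      induction l with
      | nil => rfl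
      | cons x xs ih => simpa using ih
    rw [hfold0]
    simp
  · rw [hA]
    congr 1
    refine PySem.List.foldl_congr_mem _ _ _ _ fun acc i hi => ?_
    have hiN : i < cs.length := List.mem_range.mp hi
    congr 1
    rw [pvBuildC_spec cs (PySem.List.count cs 'B') (by omega) cs.length (le_refl _),
        Nat.sub_self]
    exact (pvGetD_cnt cs (PySem.List.count cs 'B') i hiN).symm
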